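-- pv_equiv track=rewrite | github.com/rdbrist/masters_project | src/data_processing/read.py | correct_odd_tz
-- ===== SOURCE A (Python) =====
-- def correct_odd_tz(date_str):  # Checks for untranslatable timezones
--     tz_translate = {' CEST': ' +0200',
--                     ' EDT': ' -0400',
--                     ' EST': ' -0500',
--                     ' CDT': ' -0500',
--                     ' UTC': ' +0000'}
--
--     for key, value in tz_translate.items():
--         date_str = date_str.replace(key, value)
--
--     return date_str
-- ===== SOURCE B (Python) =====
-- import re
--
-- _TZ_TRANSLATE = {' CEST': ' +0200',
--                  ' EDT': ' -0400',
--                  ' EST': ' -0500',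
--                  ' CDT': ' -0500',
--                  ' UTC': ' +0000'}
--
-- _TZ_PATTERN = re.compile('|'.join(re.escape(k) for k in _TZ_TRANSLATE))
--
--
-- def correct_odd_tz(date_str):  # Checks for untranslatable timezones
--     return _TZ_PATTERN.sub(lambda m: _TZ_TRANSLATE[m.group(0)], date_str)
-- ===== Notes on version B (the rewrite author's own statement) =====
-- stated objective: idiomatic
-- what changed: Replaced five sequential full-string str.replace passes by one precompiled alternation regex that rewrites every timezone abbreviation in a single left-to-right scan with a table lookup.
import Mathlib
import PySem

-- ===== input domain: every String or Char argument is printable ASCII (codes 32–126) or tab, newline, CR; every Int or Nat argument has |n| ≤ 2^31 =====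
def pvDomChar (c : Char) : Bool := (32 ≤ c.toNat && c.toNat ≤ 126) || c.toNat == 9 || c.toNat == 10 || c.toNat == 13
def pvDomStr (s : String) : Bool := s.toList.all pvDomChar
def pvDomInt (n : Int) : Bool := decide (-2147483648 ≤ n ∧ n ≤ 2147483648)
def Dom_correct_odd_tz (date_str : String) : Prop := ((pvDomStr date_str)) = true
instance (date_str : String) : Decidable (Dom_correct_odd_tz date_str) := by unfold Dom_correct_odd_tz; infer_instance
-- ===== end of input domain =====

-- B replaces A's five sequential full-string str.replace passes by one precompiled
-- alternation regex doing a single left-to-right scan with a table lookup (idiomatic).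

-- ===== PORT A =====
-- A applies str.replace once per dict entry, in dict insertion order.
def correct_odd_tz (date_str : String) : String :=
  let d1 := PySem.Str.replace date_str " CEST" " +0200"
  let d2 := PySem.Str.replace d1 " EDT" " -0400"
  let d3 := PySem.Str.replace d2 " EST" " -0500"
  let d4 := PySem.Str.replace d3 " CDT" " -0500"
  let d5 := PySem.Str.replace d4 " UTC" " +0000"
  d5

-- ===== PORT B =====
-- The five keys (regex alternation alternatives, in pattern order) and their values.
def tzK1 : List Char := [' ', 'C', 'E', 'S', 'T']
def tzK2 : List Char := [' ', 'E', 'D', 'T']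
def tzK3 : List Char := [' ', 'E', 'S', 'T']
def tzK4 : List Char := [' ', 'C', 'D', 'T']
def tzK5 : List Char := [' ', 'U', 'T', 'C']
def tzV1 : List Char := [' ', '+', '0', '2', '0', '0']
def tzV2 : List Char := [' ', '-', '0', '4', '0', '0']
def tzV3 : List Char := [' ', '-', '0', '5', '0', '0']
def tzV4 : List Char := [' ', '-', '0', '5', '0', '0']
def tzV5 : List Char := [' ', '+', '0', '0', '0', '0']

-- re.sub with the literal alternation ' CEST| EDT| EST| CDT| UTC' is exactly this
-- single left-to-right scan: at each position try the alternatives in pattern order,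
-- on a match emit the looked-up value and resume after the match, else copy one char.
def tzScan : List Char → List Char
  | [] => []
  | c :: t =>
    if tzK1.isPrefixOf (c :: t) then tzV1 ++ tzScan (t.drop 4)
    else if tzK2.isPrefixOf (c :: t) then tzV2 ++ tzScan (t.drop 3)
    else if tzK3.isPrefixOf (c :: t) then tzV3 ++ tzScan (t.drop 3)
    else if tzK4.isPrefixOf (c :: t) then tzV4 ++ tzScan (t.drop 3)
    else if tzK5.isPrefixOf (c :: t) then tzV5 ++ tzScan (t.drop 3)
    else c :: tzScan t
  termination_by l => l.length
  decreasing_by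
  · simpa using Nat.lt_succ_of_le (Nat.sub_le _ _)
  · simpa using Nat.lt_succ_of_le (Nat.sub_le _ _)
  · simpa using Nat.lt_succ_of_le (Nat.sub_le _ _)
  · simpa using Nat.lt_succ_of_le (Nat.sub_le _ _)
  · simpa using Nat.lt_succ_of_le (Nat.sub_le _ _)
  · simp

def correct_odd_tz_alt (date_str : String) : String :=
  String.ofList (tzScan date_str.toList)

-- ===== PRECONDITION & SPEC =====
def Spec_correct_odd_tz (date_str : String) (out : String) : Prop := out = correct_odd_tz_alt date_str
instance (date_str : String) (out : String) : Decidable (Spec_correct_odd_tz date_str out) := by unfold Spec_correct_odd_tz; infer_instance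

-- ===== CLAIM (what is proved, stated in full; the proofs are below) =====
def Claim_equal_correct_odd_tz : Prop := ∀ (date_str : String), Dom_correct_odd_tz date_str → Spec_correct_odd_tz date_str (correct_odd_tz date_str)

-- ===== LEMMAS AND PROOFS =====

-- A clean structural model of Python's str.replace (left-to-right, non-overlapping),
-- for non-empty search strings.
def rep1 (old new : List Char) : List Char → List Char
  | [] => []
  | c :: t =>
    if old.isPrefixOf (c :: t) then new ++ rep1 old new (t.drop (old.length - 1))
    else c :: rep1 old new t
  termination_by l => l.length
  decreasing_by
  · simpa using Nat.lt_succ_of_le (Nat.sub_le _ _)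
  · simp

lemma rep1_nil (old new : List Char) : rep1 old new [] = [] := by
  simp [rep1]

lemma rep1_cons (old new : List Char) (c : Char) (t : List Char) :
    rep1 old new (c :: t) =
      if old.isPrefixOf (c :: t) then new ++ rep1 old new (t.drop (old.length - 1))
      else c :: rep1 old new t := by
  rw [rep1]

lemma go_eq_rep1 (old new : List Char) (hold : old ≠ []) :
    ∀ fuel l acc, l.length ≤ fuel →
      PySem.Chars.replace.go old new fuel l acc = acc.reverse ++ rep1 old new l := by
  intro fuel
  induction fuel with
  | zero =>
    intro l acc hl
    have : l = [] := List.eq_nil_of_length_eq_zero (Nat.le_zero.mp hl)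
    subst this
    simp [PySem.Chars.replace.go, rep1_nil]
  | succ n ih =>
    intro l acc hl
    cases l with
    | nil =>
      simp [PySem.Chars.replace.go, rep1_nil]
    | cons c t =>
      simp only [List.length_cons] at hl
      rw [PySem.Chars.replace.go, rep1_cons]
      by_cases h : old.isPrefixOf (c :: t) = true
      · simp only [h, if_true]
        have hlen : (List.drop old.length (c :: t)).length ≤ n := by
          have : 0 < old.length := List.length_pos_of_ne_nil hold
          simp only [List.length_drop, List.length_cons]
          omega
        rw [ih _ _ hlen]
        have hd : List.drop old.length (c :: t) = t.drop (old.length - 1) := by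
          have : 0 < old.length := List.length_pos_of_ne_nil hold
          obtain ⟨m, hm⟩ := Nat.exists_eq_succ_of_ne_zero (Nat.pos_iff_ne_zero.mp this)
          rw [hm]
          simp
        rw [hd]
        simp
      · simp only [h]
        have hlen : t.length ≤ n := by omega
        rw [ih _ _ hlen]
        simp

lemma replace_eq_rep1 (s old new : List Char) (hold : old ≠ []) :
    PySem.Chars.replace s old new = rep1 old new s := by
  rw [PySem.Chars.replace]
  have : old.isEmpty = false := by simpa [List.isEmpty_iff] using hold
  rw [this]
  simpa using go_eq_rep1 old new hold s.length s [] (le_refl _)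

-- "key k mismatches chunk a at every start position": decidable, checked by decide
-- on the ten (key, key-chunk) and ten (key, value-chunk) literal pairs below.
abbrev mism (k a : List Char) : Prop :=
  ∀ m, m < a.length → ∃ i, i < k.length ∧ m + i < a.length ∧ k[i]? ≠ a[m + i]?


lemma notPrefix_of_mism {k a : List Char} (h : mism k a) {m : Nat} (hm : m < a.length)
    (x : List Char) : ¬ k.isPrefixOf (a.drop m ++ x) = true := by
  rw [List.isPrefixOf_iff_prefix]
  intro hp
  obtain ⟨i, hik, hia, hne⟩ := h m hm
  apply hne
  have h1 : (a.drop m ++ x)[i]? = k[i]? := by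
    obtain ⟨t, ht⟩ := hp
    rw [← ht, List.getElem?_append_left hik]
  have h2 : (a.drop m ++ x)[i]? = (a.drop m)[i]? := by
    rw [List.getElem?_append_left]
    simp only [List.length_drop]
    omega
  have h3 : (a.drop m)[i]? = a[m + i]? := by
    rw [List.getElem?_drop]
  rw [← h1, h2, h3]

lemma mism_tail {k : List Char} {c : Char} {a : List Char} (h : mism k (c :: a)) :
    mism k a := by
  intro m hm
  obtain ⟨i, hik, hia, hne⟩ := h (m + 1) (by simpa using Nat.succ_lt_succ hm)
  exact ⟨i, hik, by simpa [Nat.succ_add] using hia, by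
    simpa [Nat.succ_add, List.getElem?_cons_succ] using hne⟩

lemma rep_skip (k v : List Char) {a : List Char} (h : mism k a) (x : List Char) :
    rep1 k v (a ++ x) = a ++ rep1 k v x := by
  induction a with
  | nil => simp
  | cons c a' ih =>
    have h0 : ¬ k.isPrefixOf ((c :: a').drop 0 ++ x) = true :=
      notPrefix_of_mism h (by simp) x
    simp only [List.drop_zero] at h0
    rw [List.cons_append, rep1_cons, if_neg (by simpa using h0)]
    rw [ih (mism_tail h), List.cons_append]

lemma rep_hit (k v y : List Char) (hk : k ≠ []) :
    rep1 k v (k ++ y) = v ++ rep1 k v y := by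
  obtain ⟨c, k', rfl⟩ := List.exists_cons_of_ne_nil hk
  rw [List.cons_append, rep1_cons]
  have hp : (c :: k').isPrefixOf (c :: (k' ++ y)) = true := by
    rw [List.isPrefixOf_iff_prefix, ← List.cons_append]
    exact List.prefix_append _ _
  simp only [hp, if_true, List.length_cons, Nat.add_sub_cancel, List.drop_left]

-- if the searched value starts with ' ' then a space-free list w is a prefix of
-- rep1 k (' '::v') u only when it already was a prefix of u.
lemma no_space_prefix (k vw : List Char) :
    ∀ u w : List Char, ' ' ∉ w →
      w.isPrefixOf (rep1 k (' ' :: vw) u) = true → w.isPrefixOf u = true := by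
  intro u
  induction u with
  | nil =>
    intro w _ hw
    rw [rep1_nil] at hw
    exact hw
  | cons c t ih =>
    intro w hsp hw
    cases w with
    | nil => simp [List.isPrefixOf]
    | cons a w' =>
      rw [rep1_cons] at hw
      by_cases h : k.isPrefixOf (c :: t) = true
      · simp only [h, if_true, List.cons_append] at hw
        simp only [List.isPrefixOf] at hw
        have : a = ' ' := by
          rcases Bool.and_eq_true _ _ |>.mp hw with ⟨h1, _⟩
          simpa using h1
        exact absurd (by simp [this]) hsp
      · simp only [h, List.isPrefixOf] at hw ⊢
        rcases Bool.and_eq_true _ _ |>.mp hw with ⟨h1, h2⟩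
        rw [h1]
        simpa using ih w' (fun hm => hsp (List.mem_cons_of_mem _ hm)) h2

-- propagate "key not a prefix here" through an inner replace pass.
lemma prefix_propagate (kw vw k' : List Char) (c : Char) (u : List Char)
    (hsp : ' ' ∉ kw)
    (h : ¬ (' ' :: kw).isPrefixOf (c :: u) = true) :
    ¬ (' ' :: kw).isPrefixOf (c :: rep1 k' (' ' :: vw) u) = true := by
  intro hp
  apply h
  simp only [List.isPrefixOf] at hp ⊢
  rcases Bool.and_eq_true _ _ |>.mp hp with ⟨h1, h2⟩
  rw [h1]
  simpa using no_space_prefix k' vw u kw hsp h2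

-- the five-pass cascade of A equals B's one-pass scan.
lemma chain_eq_scan : ∀ n l, l.length ≤ n →
    rep1 tzK5 tzV5 (rep1 tzK4 tzV4 (rep1 tzK3 tzV3 (rep1 tzK2 tzV2 (rep1 tzK1 tzV1 l)))) =
      tzScan l := by
  intro n
  induction n with
  | zero =>
    intro l hl
    have : l = [] := List.eq_nil_of_length_eq_zero (Nat.le_zero.mp hl)
    subst this
    simp [rep1_nil, tzScan]
  | succ n ih =>
    intro l hl
    cases l with
    | nil => simp [rep1_nil, tzScan]
    | cons c t =>
      simp only [List.length_cons] at hl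
      rw [tzScan]
      by_cases h1 : tzK1.isPrefixOf (c :: t) = true
      · -- l = tzK1 ++ r
        obtain ⟨r, hr⟩ := List.isPrefixOf_iff_prefix.mp h1
        rw [if_pos h1, ← hr]
        rw [rep_hit tzK1 tzV1 r (by decide)]
        rw [rep_skip tzK2 tzV2 (a := tzV1) (by decide),
            rep_skip tzK3 tzV3 (a := tzV1) (by decide),
            rep_skip tzK4 tzV4 (a := tzV1) (by decide),
            rep_skip tzK5 tzV5 (a := tzV1) (by decide)]
        have hrlen : r.length ≤ n := by
          have := congrArg List.length hr
          simp [tzK1] at this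
          omega
        rw [ih r hrlen]
        have hdrop : t.drop 4 = r := by
          have : (tzK1 ++ r).drop 5 = r := by
            rw [List.drop_append_of_le_length (by decide)]
            simp [tzK1]
          rw [hr] at this
          simpa using this
        rw [hdrop]
      · rw [if_neg h1]
        by_cases h2 : tzK2.isPrefixOf (c :: t) = true
        · obtain ⟨r, hr⟩ := List.isPrefixOf_iff_prefix.mp h2
          rw [if_pos h2, ← hr]
          rw [rep_skip tzK1 tzV1 (a := tzK2) (by decide)]
          rw [rep_hit tzK2 tzV2 _ (by decide)]
          rw [rep_skip tzK3 tzV3 (a := tzV2) (by decide),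
              rep_skip tzK4 tzV4 (a := tzV2) (by decide),
              rep_skip tzK5 tzV5 (a := tzV2) (by decide)]
          have hrlen : r.length ≤ n := by
            have := congrArg List.length hr
            simp [tzK2] at this
            omega
          rw [ih r hrlen]
          have hdrop : t.drop 3 = r := by
            have : (tzK2 ++ r).drop 4 = r := by
              rw [List.drop_append_of_le_length (by decide)]
              simp [tzK2]
            rw [hr] at this
            simpa using this
          rw [hdrop]
        · rw [if_neg h2]
          by_cases h3 : tzK3.isPrefixOf (c :: t) = true
          · obtain ⟨r, hr⟩ := List.isPrefixOf_iff_prefix.mp h3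
            rw [if_pos h3, ← hr]
            rw [rep_skip tzK1 tzV1 (a := tzK3) (by decide),
                rep_skip tzK2 tzV2 (a := tzK3) (by decide)]
            rw [rep_hit tzK3 tzV3 _ (by decide)]
            rw [rep_skip tzK4 tzV4 (a := tzV3) (by decide),
                rep_skip tzK5 tzV5 (a := tzV3) (by decide)]
            have hrlen : r.length ≤ n := by
              have := congrArg List.length hr
              simp [tzK3] at this
              omega
            rw [ih r hrlen]
            have hdrop : t.drop 3 = r := by
              have : (tzK3 ++ r).drop 4 = r := by
                rw [List.drop_append_of_le_length (by decide)]
                simp [tzK3]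
              rw [hr] at this
              simpa using this
            rw [hdrop]
          · rw [if_neg h3]
            by_cases h4 : tzK4.isPrefixOf (c :: t) = true
            · obtain ⟨r, hr⟩ := List.isPrefixOf_iff_prefix.mp h4
              rw [if_pos h4, ← hr]
              rw [rep_skip tzK1 tzV1 (a := tzK4) (by decide),
                  rep_skip tzK2 tzV2 (a := tzK4) (by decide),
                  rep_skip tzK3 tzV3 (a := tzK4) (by decide)]
              rw [rep_hit tzK4 tzV4 _ (by decide)]
              rw [rep_skip tzK5 tzV5 (a := tzV4) (by decide)]
              have hrlen : r.length ≤ n := by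
                have := congrArg List.length hr
                simp [tzK4] at this
                omega
              rw [ih r hrlen]
              have hdrop : t.drop 3 = r := by
                have : (tzK4 ++ r).drop 4 = r := by
                  rw [List.drop_append_of_le_length (by decide)]
                  simp [tzK4]
                rw [hr] at this
                simpa using this
              rw [hdrop]
            · rw [if_neg h4]
              by_cases h5 : tzK5.isPrefixOf (c :: t) = true
              · obtain ⟨r, hr⟩ := List.isPrefixOf_iff_prefix.mp h5
                rw [if_pos h5, ← hr]
                rw [rep_skip tzK1 tzV1 (a := tzK5) (by decide),
                    rep_skip tzK2 tzV2 (a := tzK5) (by decide),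
                    rep_skip tzK3 tzV3 (a := tzK5) (by decide),
                    rep_skip tzK4 tzV4 (a := tzK5) (by decide)]
                rw [rep_hit tzK5 tzV5 _ (by decide)]
                have hrlen : r.length ≤ n := by
                  have := congrArg List.length hr
                  simp [tzK5] at this
                  omega
                rw [ih r hrlen]
                have hdrop : t.drop 3 = r := by
                  have : (tzK5 ++ r).drop 4 = r := by
                    rw [List.drop_append_of_le_length (by decide)]
                    simp [tzK5]
                  rw [hr] at this
                  simpa using this
                rw [hdrop]
              · rw [if_neg h5]
                -- no key matches here: every pass copies c and recurses on the tails.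
                have e1 : rep1 tzK1 tzV1 (c :: t) = c :: rep1 tzK1 tzV1 t := by
                  rw [rep1_cons, if_neg h1]
                have h2' := prefix_propagate ['E','D','T'] ['+','0','2','0','0'] tzK1 c t
                  (by decide) h2
                have h2'' : ¬ tzK2.isPrefixOf (c :: rep1 tzK1 tzV1 t) = true := h2'
                have e2 : rep1 tzK2 tzV2 (c :: rep1 tzK1 tzV1 t) =
                    c :: rep1 tzK2 tzV2 (rep1 tzK1 tzV1 t) := by
                  rw [rep1_cons, if_neg h2'']
                have h3a := prefix_propagate ['E','S','T'] ['+','0','2','0','0'] tzK1 c t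
                  (by decide) h3
                have h3b := prefix_propagate ['E','S','T'] ['-','0','4','0','0'] tzK2 c
                  (rep1 tzK1 tzV1 t) (by decide) h3a
                have h3c : ¬ tzK3.isPrefixOf (c :: rep1 tzK2 tzV2 (rep1 tzK1 tzV1 t)) = true := h3b
                have e3 : rep1 tzK3 tzV3 (c :: rep1 tzK2 tzV2 (rep1 tzK1 tzV1 t)) =
                    c :: rep1 tzK3 tzV3 (rep1 tzK2 tzV2 (rep1 tzK1 tzV1 t)) := by
                  rw [rep1_cons, if_neg h3c]
                have h4a := prefix_propagate ['C','D','T'] ['+','0','2','0','0'] tzK1 c t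
                  (by decide) h4
                have h4b := prefix_propagate ['C','D','T'] ['-','0','4','0','0'] tzK2 c
                  (rep1 tzK1 tzV1 t) (by decide) h4a
                have h4c := prefix_propagate ['C','D','T'] ['-','0','5','0','0'] tzK3 c
                  (rep1 tzK2 tzV2 (rep1 tzK1 tzV1 t)) (by decide) h4b
                have h4d : ¬ tzK4.isPrefixOf
                    (c :: rep1 tzK3 tzV3 (rep1 tzK2 tzV2 (rep1 tzK1 tzV1 t))) = true := h4c
                have e4 : rep1 tzK4 tzV4
                    (c :: rep1 tzK3 tzV3 (rep1 tzK2 tzV2 (rep1 tzK1 tzV1 t))) =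
                    c :: rep1 tzK4 tzV4 (rep1 tzK3 tzV3 (rep1 tzK2 tzV2 (rep1 tzK1 tzV1 t))) := by
                  rw [rep1_cons, if_neg h4d]
                have h5a := prefix_propagate ['U','T','C'] ['+','0','2','0','0'] tzK1 c t
                  (by decide) h5
                have h5b := prefix_propagate ['U','T','C'] ['-','0','4','0','0'] tzK2 c
                  (rep1 tzK1 tzV1 t) (by decide) h5a
                have h5c := prefix_propagate ['U','T','C'] ['-','0','5','0','0'] tzK3 c
                  (rep1 tzK2 tzV2 (rep1 tzK1 tzV1 t)) (by decide) h5b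
                have h5d := prefix_propagate ['U','T','C'] ['-','0','5','0','0'] tzK4 c
                  (rep1 tzK3 tzV3 (rep1 tzK2 tzV2 (rep1 tzK1 tzV1 t))) (by decide) h5c
                have h5e : ¬ tzK5.isPrefixOf
                    (c :: rep1 tzK4 tzV4 (rep1 tzK3 tzV3 (rep1 tzK2 tzV2 (rep1 tzK1 tzV1 t)))) = true := h5d
                have e5 : rep1 tzK5 tzV5
                    (c :: rep1 tzK4 tzV4 (rep1 tzK3 tzV3 (rep1 tzK2 tzV2 (rep1 tzK1 tzV1 t)))) =
                    c :: rep1 tzK5 tzV5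
                      (rep1 tzK4 tzV4 (rep1 tzK3 tzV3 (rep1 tzK2 tzV2 (rep1 tzK1 tzV1 t)))) := by
                  rw [rep1_cons, if_neg h5e]
                rw [e1, e2, e3, e4, e5]
                have htlen : t.length ≤ n := by omega
                rw [ih t htlen]

-- ===== VERDICT (by name: the statement is the Claim_ definition above) =====
theorem correct_odd_tz_spec : Claim_equal_correct_odd_tz := by
  intro s _
  show correct_odd_tz s = correct_odd_tz_alt s
  simp only [correct_odd_tz, correct_odd_tz_alt, PySem.Str.replace, String.toList_ofList]
  congr 1
  rw [replace_eq_rep1 _ _ _ (by decide), replace_eq_rep1 _ _ _ (by decide),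
      replace_eq_rep1 _ _ _ (by decide), replace_eq_rep1 _ _ _ (by decide),
      replace_eq_rep1 _ _ _ (by decide)]
  rw [show (" CEST" : String).toList = tzK1 by decide,
      show (" +0200" : String).toList = tzV1 by decide,
      show (" EDT" : String).toList = tzK2 by decide,
      show (" -0400" : String).toList = tzV2 by decide,
      show (" EST" : String).toList = tzK3 by decide,
      show (" CDT" : String).toList = tzK4 by decide,
      show (" UTC" : String).toList = tzK5 by decide,
      show (" +0000" : String).toList = tzV5 by decide]
  -- the values of ' EST' and ' CDT' coincide (both ' -0500' = tzV3 = tzV4, defeq)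
  exact chain_eq_scan s.toList.length s.toList (le_refl _)
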